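-- pv_equiv track=rewrite | github.com/alvisespano/perturb | dataset/python/notorious/find_duplicate.py | f__cf
-- ===== SOURCE A (Python) =====
-- def f__cf(A):
--     i = 0
--     length = len(A)
--     trovato = False
--     while i < length and not trovato:
--         j = i + 1
--         tmp = j - i
--         while j < length and not trovato:
--             if A[i] == A[j]:
--                 trovato = True
--             else:
--                 j = j + tmp
--         if not trovato:
--             i = i + tmp * 2 - tmp
--     if trovato:
--         return i
--     else:
--         return -1
-- ===== SOURCE B (Python) =====
-- def f__cf(A):
--     # single right-to-left pass with a set of values seen so far (to the right);
--     # the last index overwritten is the smallest index whose value recurs later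
--     seen = set()
--     ans = -1
--     for i in range(len(A) - 1, -1, -1):
--         if A[i] in seen:
--             ans = i
--         seen.add(A[i])
--     return ans
-- ===== Notes on version B (the rewrite author's own statement) =====
-- stated objective: faster
-- what changed: Replaced the nested quadratic scan (for each i, scan all j>i for an equal value) by a single right-to-left pass that maintains a hash set of values already seen and keeps the smallest index whose value is in that set.
import Mathlib
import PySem

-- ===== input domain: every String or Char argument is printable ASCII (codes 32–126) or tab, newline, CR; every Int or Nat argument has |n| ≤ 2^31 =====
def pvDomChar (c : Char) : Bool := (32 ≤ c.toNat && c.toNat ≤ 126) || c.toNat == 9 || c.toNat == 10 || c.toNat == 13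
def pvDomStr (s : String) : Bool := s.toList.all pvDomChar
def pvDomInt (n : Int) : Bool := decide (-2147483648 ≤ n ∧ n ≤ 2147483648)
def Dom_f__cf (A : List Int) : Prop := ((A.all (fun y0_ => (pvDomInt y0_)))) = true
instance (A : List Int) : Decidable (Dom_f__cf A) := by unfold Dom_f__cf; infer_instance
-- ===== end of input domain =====

-- B replaces A's nested quadratic scan by one right-to-left pass over a set of seen values (objective: faster).


-- ===== PORT A =====
-- inner 'while j < length and not trovato' loop; indices i, j are always in range, so
-- A[i]/A[j] are PySem.List.pyGetD (exact there); 0 < tmp is carried for termination only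
def f__cf_inner (A : List Int) (length i tmp : Int) (htmp : 0 < tmp) (j : Int) (trovato : Bool) :
    Int × Bool :=
  if _h : j < length ∧ trovato = false then
    if PySem.List.pyGetD A i 0 = PySem.List.pyGetD A j 0 then (j, true)
    else f__cf_inner A length i tmp htmp (j + tmp) trovato
  else (j, trovato)
termination_by (length - j).toNat
decreasing_by omega

-- outer 'while i < length and not trovato' loop; when the inner loop sets trovato the outer
-- condition fails on re-check, i.e. the loop exits returning the current i
def f__cf_outer (A : List Int) (length : Int) (i : Int) (trovato : Bool) : Int × Bool :=
  if _h : i < length ∧ trovato = false then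
    let j := i + 1
    let tmp := j - i
    let r := f__cf_inner A length i tmp (by omega) j trovato
    if r.2 = false then f__cf_outer A length (i + tmp * 2 - tmp) r.2
    else (i, r.2)
  else (i, trovato)
termination_by (length - i).toNat
decreasing_by omega

def f__cf (A : List Int) : Int :=
  let length : Int := A.length
  let r := f__cf_outer A length 0 false
  if r.2 = true then r.1 else -1

-- ===== PORT B =====
-- 'for i in range(len(A)-1, -1, -1)' with state (seen, ans); A[i] is always in range
def f__cf_altGo (A : List Int) (idxs : List Int) (seen : PySem.Set Int) (ans : Int) : Int :=
  match idxs with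
  | [] => ans
  | i :: rest =>
    let x := PySem.List.pyGetD A i 0
    let ans' := if PySem.Set.contains seen x then i else ans
    f__cf_altGo A rest (PySem.Set.add seen x) ans'

def f__cf_alt (A : List Int) : Int :=
  f__cf_altGo A (PySem.List.pyRange ((A.length : Int) - 1) (-1) (-1)) PySem.Set.empty (-1)

-- ===== PRECONDITION & SPEC =====
def Spec_f__cf (A : List Int) (out : Int) : Prop := out = f__cf_alt A
instance (A : List Int) (out : Int) : Decidable (Spec_f__cf A out) := by unfold Spec_f__cf; infer_instance

-- ===== CLAIM (what is proved, stated in full; the proofs are below) =====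
def Claim_equal_f__cf : Prop := ∀ (A : List Int), Dom_f__cf A → Spec_f__cf A (f__cf A)

-- ===== LEMMAS AND PROOFS =====

-- common characterisation: first index (counted from i) whose value recurs later, else -1
def fdSpec : List Int → Int → Int
  | [], _ => -1
  | x :: rest, i => if x ∈ rest then i else fdSpec rest (i + 1)

lemma innerA_spec' (A : List Int) (i : Nat) (hi : i < A.length)
    (tmp : Int) (htmp : 0 < tmp) (htmp1 : tmp = 1)
    (j : Int) (jn : Nat) (hjn : j = (jn : Int)) :
    (f__cf_inner A A.length i tmp htmp j false).2 = decide (A[i] ∈ A.drop jn) := by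
  subst htmp1
  subst hjn
  by_cases hj : jn < A.length
  · have hd : A[i] ∈ A.drop jn ↔ (A[i] = A[jn] ∨ A[i] ∈ A.drop (jn + 1)) := by
      rw [List.drop_eq_getElem_cons hj, List.mem_cons]
    rw [f__cf_inner, dif_pos ⟨by exact_mod_cast hj, rfl⟩]
    simp only [PySem.List.pyGetD_natCast, List.getD_eq_getElem?_getD,
      List.getElem?_eq_getElem hi, List.getElem?_eq_getElem hj, Option.getD_some]
    by_cases heq : A[i] = A[jn]
    · rw [if_pos heq]
      simp [hd.mpr (Or.inl heq)]
    · rw [if_neg heq]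
      have hcast : (jn : Int) + 1 = ((jn + 1 : Nat) : Int) := by push_cast; ring
      rw [innerA_spec' A i hi 1 htmp rfl ((jn : Int) + 1) (jn + 1) hcast]
      simp [hd, heq]
  · rw [f__cf_inner]
    have hcond : ¬ (((jn : Int)) < (A.length : Int) ∧ false = false) := by
      intro h; omega
    rw [dif_neg hcond]
    have : A.drop jn = [] := List.drop_eq_nil_of_le (by omega)
    simp [this]
termination_by A.length - jn

lemma outerA_spec (A : List Int) (i : Int) (ni : Nat) (hni : i = (ni : Int)) :
    (if (f__cf_outer A A.length i false).2 = true
     then (f__cf_outer A A.length i false).1 else -1)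
      = fdSpec (A.drop ni) ni := by
  subst hni
  by_cases hi : ni < A.length
  · rw [f__cf_outer, dif_pos ⟨by exact_mod_cast hi, rfl⟩]
    simp only []
    have htmps : ((ni : Int) + 1 - ni) = 1 := by ring
    simp only [htmps]
    have hinner :
        (f__cf_inner A A.length ni 1 (by omega) ((ni : Int) + 1) false).2
          = decide (A[ni] ∈ A.drop (ni + 1)) :=
      innerA_spec' A ni hi 1 (by omega) rfl _ (ni + 1) (by push_cast; ring)
    rw [List.drop_eq_getElem_cons hi, fdSpec]
    have harg : (ni : Int) + 1 * 2 - 1 = ((ni + 1 : Nat) : Int) := by push_cast; ring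
    by_cases hmem : A[ni] ∈ A.drop (ni + 1)
    · have hinner1 : (f__cf_inner A A.length ni 1 (by omega) ((ni : Int) + 1) false).2 = true := by
        simp [hinner, hmem]
      simp [hinner1, hmem]
    · have hinner0 : (f__cf_inner A A.length ni 1 (by omega) ((ni : Int) + 1) false).2 = false := by
        simp [hinner, hmem]
      simp only [hinner0, harg]
      rw [if_pos trivial]
      rw [outerA_spec A ((ni + 1 : Nat) : Int) (ni + 1) rfl]
      simp only [if_neg hmem]
      push_cast
      ring_nf
  · rw [f__cf_outer]
    have hcond : ¬ (((ni : Int)) < (A.length : Int) ∧ false = false) := by intro h; omega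
    rw [dif_neg hcond]
    have : A.drop ni = [] := List.drop_eq_nil_of_le (by omega)
    simp [this, fdSpec]
termination_by A.length - ni

lemma altGo_spec (A : List Int) (i : Nat) (hi : i ≤ A.length)
    (seen : PySem.Set Int) (ans : Int)
    (hseen : ∀ x, x ∈ seen ↔ x ∈ A.drop i)
    (hans : ans = fdSpec (A.drop i) i) :
    f__cf_altGo A (PySem.List.pyRange ((i : Int) - 1) (-1) (-1)) seen ans = fdSpec A 0 := by
  induction i generalizing seen ans with
  | zero =>
    rw [PySem.List.pyRange_neg_one_eq_nil (by omega)]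
    simpa using hans
  | succ k ih =>
    have hk : k < A.length := by omega
    have h1 : ((k + 1 : Nat) : Int) - 1 = (k : Int) := by push_cast; ring
    rw [h1, PySem.List.pyRange_neg_one_cons (by omega)]
    show f__cf_altGo A ((k : Int) :: PySem.List.pyRange ((k : Int) - 1) (-1) (-1)) seen ans
        = fdSpec A 0
    rw [f__cf_altGo]
    simp only [PySem.List.pyGetD_natCast, List.getD_eq_getElem?_getD,
      List.getElem?_eq_getElem hk, Option.getD_some]
    apply ih (by omega)
    · intro x
      rw [PySem.Set.mem_add, hseen x, List.drop_eq_getElem_cons hk]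
      simp only [List.mem_cons]
      tauto
    · rw [List.drop_eq_getElem_cons hk, fdSpec, hans, PySem.Set.contains_eq_decide]
      have : (A[k] ∈ seen) ↔ (A[k] ∈ A.drop (k + 1)) := hseen A[k]
      by_cases h : A[k] ∈ A.drop (k + 1) <;> simp [h, this]

-- ===== VERDICT (by name: the statement is the Claim_ definition above) =====
theorem f__cf_spec : Claim_equal_f__cf := by
  intro A _
  show f__cf A = f__cf_alt A
  have ha : f__cf A = fdSpec A 0 := by
    have := outerA_spec A 0 0 rfl
    simpa [f__cf] using this
  have hb : f__cf_alt A = fdSpec A 0 := by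
    unfold f__cf_alt
    exact altGo_spec A A.length le_rfl PySem.Set.empty (-1)
      (by intro x; simp [PySem.Set.empty, List.drop_eq_nil_of_le (le_refl A.length)])
      (by simp [List.drop_eq_nil_of_le (le_refl A.length), fdSpec])
  rw [ha, hb]
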